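-- pv_equiv track=rewrite | github.com/kuznetsovvj/education | algorithms/codeforces/1805b.py | check
-- ===== SOURCE A (Python) =====
-- def check(word):
--     m = ord('z')
--     idx = len(word) - 1
--     for i in range(len(word)-1, 0, -1):
--         if ord(word[i]) < m:
--             m = ord(word[i])
--             idx = i
--     if m <= ord(word[0]):
--         return word[idx] + word[:idx] + word[idx+1:]
--     return word
-- ===== SOURCE B (Python) =====
-- def check(word):
--     first = word[0]
--     last_at = {}
--     for i in range(1, len(word)):
--         last_at[word[i]] = i
--     for code in range(128):
--         c = chr(code)
--         if c in last_at:
--             if c <= first: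
--                 i = last_at[c]
--                 return word[i] + word[:i] + word[i+1:]
--             return word
--     return word
-- ===== Notes on version B (the rewrite author's own statement) =====
-- stated objective: alternative
-- what changed: A's backward comparison-based argmin scan (sentinel 122, tracked best index) is replaced by a bucket approach: one forward pass records the last position of every character of word[1:] in a dict, then an ascending sweep over the 128 ASCII codes finds the smallest character present without any character-to-character minimum tracking.
-- intended difference: On words of length >= 2 all of whose characters have code >= 122 (codes 122-126), except when min(word[1:]) <= word[0] and the last character equals that minimum, A's sentinel 122 masks the true minimum of the tail and A moves the wrong character or moves one when it should not (e.g. on the witness A swaps the two characters); B returns the intended value (move the rightmost minimum of the tail to the front only when it is <= the first character). — e.g. on check("z{"): A returns "{z", B returns "z{"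
import Mathlib
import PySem

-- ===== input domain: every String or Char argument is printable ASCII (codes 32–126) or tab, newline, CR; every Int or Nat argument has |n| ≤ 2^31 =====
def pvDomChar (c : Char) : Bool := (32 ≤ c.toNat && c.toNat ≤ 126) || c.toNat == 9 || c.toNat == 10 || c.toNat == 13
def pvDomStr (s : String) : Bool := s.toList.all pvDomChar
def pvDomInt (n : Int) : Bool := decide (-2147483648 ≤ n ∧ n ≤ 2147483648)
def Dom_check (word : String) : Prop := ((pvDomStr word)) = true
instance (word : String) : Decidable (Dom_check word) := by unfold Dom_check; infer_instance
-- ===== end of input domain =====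

-- B replaces A's backward sentinel-argmin scan by a bucket approach (dict of last positions +
-- ascending sweep of the 128 ASCII codes); equivalent outside D_check, where A's sentinel (code
-- 122) gives the wrong answer and B gives the intended one.

-- ===== PORT A =====
-- the for-loop of A: state (m, idx), scanning i = len-1 .. 1
def checkLoop (cs : List Char) : Int × Int :=
  (PySem.List.pyRange ((cs.length : Int) - 1) 0 (-1)).foldl
    (fun st i =>
      if ((PySem.List.pyGetD cs i 'z').toNat : Int) < st.1
      then (((PySem.List.pyGetD cs i 'z').toNat : Int), i)
      else st)
    (122, (cs.length : Int) - 1)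

def check (word : String) : String :=
  let cs := word.toList
  let st := checkLoop cs
  match PySem.List.pyGet? cs 0 with
  | none => ""   -- Python raises IndexError on word[0] here (empty word); excluded by Pre_check
  | some c0 =>
    if st.1 ≤ (c0.toNat : Int) then
      String.ofList (PySem.List.pyGetD cs st.2 c0 ::
        (PySem.List.slice cs none (some st.2) ++ PySem.List.slice cs (some (st.2 + 1)) none))
    else word

-- ===== PORT B =====
-- first Python loop: last_at[word[i]] = i for i in range(1, len(word))
def buildLast (cs : List Char) : PySem.Dict Char Int :=
  (PySem.List.pyRange 1 (cs.length : Int) 1).foldl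
    (fun d i => d.insert (PySem.List.pyGetD cs i ' ') i) PySem.Dict.empty

-- second Python loop: for code in range(128) with early returns (the recursion returns out of the loop)
def scanCodes (codes : List Int) (d : PySem.Dict Char Int) (cs : List Char) (first : Char)
    (word : String) : String :=
  match codes with
  | [] => word
  | k :: rest =>
    let c := Char.ofNat k.toNat   -- chr(code); exact for the codes 0..127 the loop visits
    if d.contains c then
      if c ≤ first then
        let i := d.getD c 0   -- last_at[c]; the key is present (contains just checked)
        String.ofList (PySem.List.pyGetD cs i first ::
          (PySem.List.slice cs none (some i) ++ PySem.List.slice cs (some (i + 1)) none))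
      else word
    else scanCodes rest d cs first word

def check_alt (word : String) : String :=
  let cs := word.toList
  match PySem.List.pyGet? cs 0 with
  | none => ""   -- Python raises IndexError on word[0] (empty word); excluded by Pre_check
  | some first => scanCodes (PySem.List.pyRange 0 128 1) (buildLast cs) cs first word

-- ===== PRECONDITION & SPEC =====
-- Pre_check excludes only the empty word, on which the Python A raises IndexError at word[0].
def Pre_check (word : String) : Prop := word ≠ ""
instance (word : String) : Decidable (Pre_check word) := by unfold Pre_check; infer_instance
def pvWitness_check : String := "ab"

-- On words of length ≥ 2 whose characters all have code ≥ 122, except when min(word[1:]) ≤ word[0]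
-- and the last character equals that minimum, A's sentinel m = 122 masks the true minimum and A
-- moves the wrong character (or moves one when it should not); B returns the intended value.
def D_check (word : String) : Prop :=
  2 ≤ word.toList.length ∧ (∀ c ∈ word.toList, 'z' ≤ c) ∧
  ∀ m ∈ word.toList.tail, (∀ c ∈ word.toList.tail, m ≤ c) →
    ¬ (m ≤ (word.toList.head?.getD 'a') ∧ word.toList.getLast? = some m)
instance (word : String) : Decidable (D_check word) := by unfold D_check; infer_instance

def Spec_check (word : String) (out : String) : Prop := ¬ D_check word → out = check_alt word
instance (word : String) (out : String) : Decidable (Spec_check word out) := by unfold Spec_check; infer_instance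

def pvDiffWitness_check : String := "z{"
def pvDiffWitnessOut_check : String × String := ("{z", "z{")

-- ===== CLAIM (what is proved, stated in full; the proofs are below) =====
def Claim_unchanged_check : Prop := ∀ (word : String), Dom_check word → Pre_check word → Spec_check word (check word)
def Claim_changed_check : Prop := Dom_check (pvDiffWitness_check) ∧ Pre_check (pvDiffWitness_check) ∧ D_check (pvDiffWitness_check) ∧ check (pvDiffWitness_check) = pvDiffWitnessOut_check.1 ∧ check_alt (pvDiffWitness_check) = pvDiffWitnessOut_check.2 ∧ pvDiffWitnessOut_check.1 ≠ pvDiffWitnessOut_check.2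
def Claim_exact_check : Prop := ∀ (word : String), Dom_check word → Pre_check word → D_check word → check word ≠ check_alt word

-- ===== LEMMAS AND PROOFS =====

theorem char_le_iff (c d : Char) : c ≤ d ↔ (c.toNat : Int) ≤ (d.toNat : Int) := by
  rw [Char.le_def, UInt32.le_iff_toNat_le, Char.toNat_val, Char.toNat_val]; exact Int.ofNat_le.symm

theorem char_lt_iff (c d : Char) : c < d ↔ (c.toNat : Int) < (d.toNat : Int) := by
  rw [Char.lt_def, UInt32.lt_iff_toNat_lt, Char.toNat_val, Char.toNat_val]; exact Int.ofNat_lt.symm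

-- right-to-left scan with an explicit counter: proof-side model of A's loop
def scanRL (zs : List Char) (k : Int) (st : Int × Int) : Int × Int :=
  match zs with
  | [] => st
  | d :: t => scanRL t (k - 1) (if ((d.toNat : Int)) < st.1 then ((d.toNat : Int), k) else st)

theorem foldl_min_le_init (t : List Char) (a : Char) : t.foldl min a ≤ a := by
  induction t generalizing a with
  | nil => exact le_refl a
  | cons c t ih => exact le_trans (ih (min a c)) (min_le_left a c)

theorem foldl_min_le_mem (t : List Char) (a x : Char) (hx : x ∈ t) : t.foldl min a ≤ x := by
  induction t generalizing a with
  | nil => cases hx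
  | cons c t ih =>
    rcases List.mem_cons.mp hx with h | h
    · subst h; exact le_trans (foldl_min_le_init t (min a x)) (min_le_right a x)
    · exact ih (min a c) h

theorem foldl_min_mem (t : List Char) (a : Char) : t.foldl min a = a ∨ t.foldl min a ∈ t := by
  induction t generalizing a with
  | nil => exact Or.inl rfl
  | cons c t ih =>
    rcases ih (min a c) with h | h
    · rcases min_cases a c with ⟨he, _⟩ | ⟨he, _⟩
      · exact Or.inl (by simpa [he] using h)
      · exact Or.inr (List.mem_cons.mpr (Or.inl (by simpa [he] using h)))
    · exact Or.inr (List.mem_cons.mpr (Or.inr h))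

theorem foldl_min_min (t : List Char) (a b : Char) :
    t.foldl min (min a b) = min a (t.foldl min b) := by
  induction t generalizing a b with
  | nil => rfl
  | cons c t ih =>
    show t.foldl min (min (min a b) c) = min a (t.foldl min (min b c))
    rw [min_assoc, ih]

theorem scanRL_high (zs : List Char) (k m0 i0 : Int)
    (h : ∀ c ∈ zs, m0 ≤ (c.toNat : Int)) : scanRL zs k (m0, i0) = (m0, i0) := by
  induction zs generalizing k with
  | nil => rfl
  | cons d t ih =>
    show scanRL t (k - 1) (if ((d.toNat : Int)) < m0 then ((d.toNat : Int), k) else (m0, i0)) = _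
    rw [if_neg (by exact not_lt.mpr (h d (List.mem_cons_self)))]
    exact ih (k - 1) (fun c hc => h c (List.mem_cons_of_mem _ hc))

theorem scanRL_cons (d : Char) (t : List Char) (k : Int) (st : Int × Int) :
    scanRL (d :: t) k st
      = scanRL t (k - 1) (if ((d.toNat : Int)) < st.1 then ((d.toNat : Int), k) else st) := rfl

theorem scanRL_low (t : List Char) (z : Char) (k m0 i0 : Int)
    (h : ((t.foldl min z).toNat : Int) < m0) :
    scanRL (z :: t) k (m0, i0) =
      (((t.foldl min z).toNat : Int), k - (List.idxOf (t.foldl min z) (z :: t) : Int)) := by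
  induction t generalizing z k m0 i0 with
  | nil =>
    rw [scanRL_cons, if_pos (by simpa using h)]
    simp [scanRL, List.idxOf_cons_self]
  | cons c t' ih =>
    have hfold : (c :: t').foldl min z = min z (t'.foldl min c) := by
      show t'.foldl min (min z c) = _
      exact foldl_min_min t' z c
    by_cases hz : ((z.toNat : Int)) < m0
    · rw [scanRL_cons, if_pos hz]
      by_cases hm : ((t'.foldl min c).toNat : Int) < ((z.toNat : Int))
      · have hme : (c :: t').foldl min z = t'.foldl min c := by
          rw [hfold]; exact min_eq_right (le_of_lt ((char_lt_iff _ _).mpr hm))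
        have hne : z ≠ t'.foldl min c := by
          intro he; rw [← he] at hm; exact lt_irrefl _ hm
        rw [ih c (k - 1) ((z.toNat : Int)) k hm, hme, List.idxOf_cons_ne _ hne]
        simp only [Prod.mk.injEq, Nat.succ_eq_add_one]
        exact ⟨trivial, by push_cast; ring⟩
      · have hge : ∀ x ∈ (c :: t'), ((z.toNat : Int)) ≤ ((x.toNat : Int)) := by
          intro x hx
          rcases List.mem_cons.mp hx with hx | hx
          · subst hx
            exact le_trans (not_lt.mp hm) ((char_le_iff _ _).mp (foldl_min_le_init t' x))
          · exact le_trans (not_lt.mp hm) ((char_le_iff _ _).mp (foldl_min_le_mem t' c x hx))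
        have hme : (c :: t').foldl min z = z := by
          rw [hfold]
          exact min_eq_left ((char_le_iff _ _).mpr (not_lt.mp hm))
        rw [scanRL_high (c :: t') (k - 1) ((z.toNat : Int)) k hge, hme,
          List.idxOf_cons_self]
        simp
    · rw [scanRL_cons, if_neg hz]
      have hlt : ((t'.foldl min c).toNat : Int) < ((z.toNat : Int)) := by
        by_contra hcon
        have hzz : (c :: t').foldl min z = z := by
          rw [hfold]
          exact min_eq_left ((char_le_iff _ _).mpr (not_lt.mp hcon))
        rw [hzz] at h; exact hz h
      have hme : (c :: t').foldl min z = t'.foldl min c := by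
        rw [hfold]; exact min_eq_right (le_of_lt ((char_lt_iff _ _).mpr hlt))
      have hne : z ≠ t'.foldl min c := by
        intro he; rw [← he] at hlt; exact lt_irrefl _ hlt
      rw [ih c (k - 1) m0 i0 (hme ▸ h), hme, List.idxOf_cons_ne _ hne]
      simp only [Prod.mk.injEq, Nat.succ_eq_add_one]
      exact ⟨trivial, by push_cast; ring⟩

theorem checkLoop_eq_scan (cs : List Char) (l : Nat) (hl : l < cs.length) (st : Int × Int) :
    (PySem.List.pyRange (l : Int) 0 (-1)).foldl
      (fun st i =>
        if ((PySem.List.pyGetD cs i 'z').toNat : Int) < st.1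
        then (((PySem.List.pyGetD cs i 'z').toNat : Int), i)
        else st) st
    = scanRL ((cs.drop 1).take l).reverse (l : Int) st := by
  induction l generalizing st with
  | zero => rw [PySem.List.pyRange_neg_one_eq_nil (by norm_num)]; rfl
  | succ l ih =>
    have hl' : l < cs.length := Nat.lt_of_succ_lt hl
    have hcast : ((l + 1 : Nat) : Int) = (l : Int) + 1 := by push_cast; ring
    rw [hcast, PySem.List.pyRange_neg_one_cons (by positivity)]
    have hstep : PySem.List.pyGetD cs ((l : Int) + 1) 'z' = cs[l + 1]'hl := by
      rw [show ((l : Int) + 1) = ((l + 1 : Nat) : Int) from by push_cast; ring]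
      rw [PySem.List.pyGetD_natCast]
      exact List.getD_eq_getElem cs 'z' hl
    have htake : (cs.drop 1).take (l + 1) = (cs.drop 1).take l ++ [cs[l + 1]'hl] := by
      have hlen : l < (cs.drop 1).length := by
        rw [List.length_drop]; omega
      rw [List.take_add_one, List.getElem?_eq_getElem hlen]
      simp
    rw [List.foldl_cons]
    have hred : (if ((PySem.List.pyGetD cs ((l:Int)+1) 'z').toNat : Int) < st.1
        then (((PySem.List.pyGetD cs ((l:Int)+1) 'z').toNat : Int), (l:Int)+1) else st)
        = (if (((cs[l + 1]'hl).toNat : Int)) < st.1 then (((cs[l+1]'hl).toNat : Int), (l:Int)+1) else st) := by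
      rw [hstep]
    have : ((l : Int) + 1 - 1) = (l : Int) := by ring
    rw [hred, this, ih hl', htake]
    simp only [List.reverse_append, List.reverse_cons, List.reverse_nil, List.nil_append,
      List.singleton_append]
    rw [scanRL_cons]
    norm_num

theorem foldl_min_lb (t : List Char) (z : Char) (x : Char) (hx : x ∈ z :: t) :
    t.foldl min z ≤ x := by
  rcases List.mem_cons.mp hx with rfl | hx
  · exact foldl_min_le_init t x
  · exact foldl_min_le_mem t z x hx

theorem foldl_min_mem_cons (t : List Char) (z : Char) : t.foldl min z ∈ z :: t := by
  rcases foldl_min_mem t z with h | h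
  · rw [h]; exact List.mem_cons_self
  · exact List.mem_cons_of_mem _ h

theorem checkLoop_char (c0 : Char) (rest : List Char) :
    checkLoop (c0 :: rest)
      = scanRL rest.reverse (rest.length : Int) (122, (rest.length : Int)) := by
  unfold checkLoop
  have hlen : (((c0 :: rest).length : Int) - 1) = ((rest.length : Nat) : Int) := by
    push_cast [List.length_cons]; ring
  rw [hlen]
  rw [checkLoop_eq_scan (c0 :: rest) rest.length (by simp) (122, (rest.length : Int))]
  congr 1
  simp

theorem word_eq_ofList (word : String) : word = String.ofList word.toList := by simp

theorem z_code : (('z'.toNat : Int)) = 122 := by decide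

theorem char_le_z_iff (c : Char) : 'z' ≤ c ↔ (122 : Int) ≤ (c.toNat : Int) := by
  rw [char_le_iff, z_code]

-- ======== B-side: characterisation of the dict of last positions and of the code sweep ========

theorem dom_code_lt (word : String) (h : Dom_check word) : ∀ c ∈ word.toList, c.toNat < 128 := by
  intro c hc
  have h' := h
  simp only [Dom_check, pvDomStr, List.all_eq_true] at h'
  have := h' c hc
  simp only [pvDomChar, Bool.or_eq_true, Bool.and_eq_true, decide_eq_true_eq, beq_iff_eq] at this
  omega

theorem toNat_ofNat_small (n : Nat) (h : n < 128) : (Char.ofNat n).toNat = n := by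
  have hv : Nat.isValidChar n := Or.inl (by omega)
  simp [Char.ofNat, hv]

theorem getElem_ne_of_lt_idxOf (c : Char) :
    ∀ (l : List Char) (k : Nat) (hk : k < l.length), k < List.idxOf c l → l[k] ≠ c := by
  intro l
  induction l with
  | nil => intro k hk; simp at hk
  | cons b t ih =>
    intro k hk hlt
    by_cases hb : b = c
    · rw [hb, List.idxOf_cons_self] at hlt; omega
    · rw [List.idxOf_cons_ne _ hb] at hlt
      cases k with
      | zero => simpa using hb
      | succ k => simp only [List.getElem_cons_succ]; exact ih k (by simpa using hk) (by omega)

theorem rev_getElem_idxOf (l : List Char) (m : Char) (hm : m ∈ l.reverse) :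
    l[l.length - 1 - List.idxOf m l.reverse]'(by
      have h := List.idxOf_lt_length_of_mem hm
      simp only [List.length_reverse] at h
      omega) = m := by
  have hj : List.idxOf m l.reverse < l.reverse.length := List.idxOf_lt_length_of_mem hm
  have h := List.getElem_idxOf hj
  rw [List.getElem_reverse] at h
  exact h

-- the value a lookup in the first loop's dict yields after the first n indices: the last
-- index j with 1 ≤ j < n and cs[j] = c
def lastAt (cs : List Char) (n : Nat) (c : Char) : Option Int :=
  match n with
  | 0 => none
  | Nat.succ m => if 1 ≤ m ∧ cs[m]? = some c then some (m : Int) else lastAt cs m c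

theorem buildLast_prefix_get (cs : List Char) (c : Char) :
    ∀ (n : Nat), n ≤ cs.length →
      ((PySem.List.pyRange 1 (n : Int) 1).foldl
        (fun d i => d.insert (PySem.List.pyGetD cs i ' ') i) PySem.Dict.empty).get? c
      = lastAt cs n c := by
  intro n
  induction n with
  | zero =>
    intro _
    rw [PySem.List.pyRange_one_eq_nil (by norm_num)]
    rfl
  | succ m ih =>
    intro hn
    cases Nat.eq_zero_or_pos m with
    | inl h0 =>
      subst h0
      rw [show ((1 : Nat) : Int) = 1 from rfl, PySem.List.pyRange_one_eq_nil (le_refl 1)]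
      show (PySem.Dict.empty : PySem.Dict Char Int).get? c = lastAt cs 1 c
      rw [lastAt, if_neg (by omega)]
      rfl
    | inr h1 =>
      have hm : m < cs.length := Nat.lt_of_succ_le hn
      have hcast : ((m + 1 : Nat) : Int) = (m : Int) + 1 := by push_cast; ring
      rw [hcast, PySem.List.pyRange_one_succ_right (by exact_mod_cast h1), List.foldl_append,
        List.foldl_cons, List.foldl_nil]
      have hkey : PySem.List.pyGetD cs (m : Int) ' ' = cs[m]'hm := by
        rw [PySem.List.pyGetD_natCast]
        exact List.getD_eq_getElem cs ' ' hm
      rw [hkey, PySem.Dict.get?_insert .., ih (Nat.le_of_succ_le hn)]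
      rw [lastAt]
      by_cases hc : c = cs[m]'hm
      · rw [if_pos hc, if_pos ⟨h1, by rw [List.getElem?_eq_getElem hm, hc]⟩]
      · rw [if_neg hc, if_neg (by
          rintro ⟨-, h⟩
          rw [List.getElem?_eq_getElem hm] at h
          exact hc (Option.some_injective _ h).symm)]

theorem lastAt_none (cs : List Char) (c : Char) (h : c ∉ cs.drop 1) :
    ∀ n, n ≤ cs.length → lastAt cs n c = none := by
  intro n
  induction n with
  | zero => intro _; rfl
  | succ m ih =>
    intro hn
    rw [lastAt, if_neg (by
      rintro ⟨h1, h2⟩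
      have hm : m < cs.length := Nat.lt_of_succ_le hn
      rw [List.getElem?_eq_getElem hm] at h2
      have hmem : c ∈ cs.drop 1 := by
        have hd : (cs.drop 1)[m - 1]'(by rw [List.length_drop]; omega) = cs[m]'hm := by
          rw [List.getElem_drop]
          congr 1
          omega
        rw [← Option.some_injective _ h2, ← hd]
        exact List.getElem_mem _
      exact h hmem)]
    exact ih (Nat.le_of_succ_le hn)

theorem lastAt_eq_of (cs : List Char) (c : Char) (j : Nat) (h1 : 1 ≤ j) (hj : j < cs.length)
    (hc : cs[j]'hj = c) (hmax : ∀ k (hk : k < cs.length), j < k → cs[k]'hk ≠ c) :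
    ∀ n, j < n → n ≤ cs.length → lastAt cs n c = some (j : Int) := by
  intro n
  induction n with
  | zero => omega
  | succ m ih =>
    intro hjn hn
    by_cases hjm : j = m
    · subst hjm
      rw [lastAt, if_pos ⟨h1, by rw [List.getElem?_eq_getElem hj, hc]⟩]
    · have hlt : j < m := by omega
      have hm : m < cs.length := Nat.lt_of_succ_le hn
      rw [lastAt, if_neg (by
        rintro ⟨-, h2⟩
        rw [List.getElem?_eq_getElem hm] at h2
        exact hmax m hm hlt (Option.some_injective _ h2))]
      exact ih hlt (Nat.le_of_succ_le hn)

-- rightmost occurrence of c among the tail positions, stated on cs = c0 :: rest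
theorem lastAt_full (c0 : Char) (rest : List Char) (c : Char) (hc : c ∈ rest) :
    lastAt (c0 :: rest) (c0 :: rest).length c
      = some ((rest.length : Int) - (List.idxOf c rest.reverse : Int)) := by
  have hmemrev : c ∈ rest.reverse := by rw [List.mem_reverse]; exact hc
  have hidx : List.idxOf c rest.reverse < rest.length := by
    have := List.idxOf_lt_length_of_mem hmemrev
    simpa using this
  set p : Nat := List.idxOf c rest.reverse with hp
  -- the rightmost occurrence sits at word index j := rest.length - p
  have hcast : ((rest.length - p : Nat) : Int) = (rest.length : Int) - (p : Int) := by
    omega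
  rw [← hcast]
  apply lastAt_eq_of (c0 :: rest) c (rest.length - p) (by omega)
    (by simp only [List.length_cons]; omega)
  · have e : rest.length - p = (rest.length - 1 - p) + 1 := by omega
    simp only [e, List.getElem_cons_succ]
    exact rev_getElem_idxOf rest c hmemrev
  · intro k hk hgt
    simp only [List.length_cons] at hk
    cases k with
    | zero => omega
    | succ k =>
      simp only [List.getElem_cons_succ]
      have hkr : k < rest.length := by omega
      have hrev2 : rest[k]'hkr = rest.reverse[rest.length - 1 - k]'(by
          simp only [List.length_reverse]; omega) := by
        rw [List.getElem_reverse]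
        congr 1
        omega
      rw [hrev2]
      exact getElem_ne_of_lt_idxOf c rest.reverse _ (by simp only [List.length_reverse]; omega)
        (by omega)
  · simp only [List.length_cons]; omega
  · exact le_refl _

theorem buildLast_get (cs : List Char) (c : Char) :
    (buildLast cs).get? c = lastAt cs cs.length c := by
  unfold buildLast
  exact buildLast_prefix_get cs c cs.length (le_refl _)

-- codes whose character is absent from the dict are skipped by the sweep
theorem scanCodes_skip (l l2 : List Int) (d : PySem.Dict Char Int) (cs : List Char)
    (first : Char) (word : String)
    (h : ∀ k ∈ l, d.contains (Char.ofNat k.toNat) = false) :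
    scanCodes (l ++ l2) d cs first word = scanCodes l2 d cs first word := by
  induction l with
  | nil => rfl
  | cons k l ih =>
    rw [List.cons_append, scanCodes]
    simp only [h k List.mem_cons_self, Bool.false_eq_true, if_false]
    exact ih (fun k' hk' => h k' (List.mem_cons_of_mem _ hk'))

theorem min_rev_eq (z : Char) (t : List Char) (z' : Char) (t' : List Char)
    (hrev : (z :: t).reverse = z' :: t') :
    t'.foldl min z' = t.foldl min z := by
  have h1 : t'.foldl min z' ∈ z :: t := by
    have := foldl_min_mem_cons t' z'
    rw [← hrev, List.mem_reverse] at this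
    exact this
  have h2 : t.foldl min z ∈ z' :: t' := by
    rw [← hrev, List.mem_reverse]
    exact foldl_min_mem_cons t z
  exact le_antisymm (foldl_min_lb t' z' _ h2) (foldl_min_lb t z _ h1)

-- the evaluation of B on a word of length ≥ 2: move the rightmost minimum M of the tail to the
-- front iff M ≤ word[0]
theorem check_alt_eval (word : String) (c0 z : Char) (t : List Char)
    (hcs : word.toList = c0 :: z :: t) (hdom : Dom_check word) :
    check_alt word =
      (if t.foldl min z ≤ c0 then
        String.ofList (PySem.List.pyGetD word.toList
            (((z :: t).length : Int) - (List.idxOf (t.foldl min z) (z :: t).reverse : Int)) c0 ::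
          (PySem.List.slice word.toList none
              (some (((z :: t).length : Int) - (List.idxOf (t.foldl min z) (z :: t).reverse : Int))) ++
            PySem.List.slice word.toList
              (some ((((z :: t).length : Int) - (List.idxOf (t.foldl min z) (z :: t).reverse : Int)) + 1)) none))
      else word) := by
  set M : Char := t.foldl min z with hM
  have hMmem : M ∈ z :: t := foldl_min_mem_cons t z
  have hMlb : ∀ x ∈ z :: t, M ≤ x := fun x hx => foldl_min_lb t z x hx
  have hM128 : M.toNat < 128 :=
    dom_code_lt word hdom M (by rw [hcs]; exact List.mem_cons_of_mem _ hMmem)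
  have hget : ∀ c, (buildLast word.toList).get? c = lastAt word.toList word.toList.length c :=
    fun c => buildLast_get word.toList c
  have hdrop : word.toList.drop 1 = z :: t := by rw [hcs]; rfl
  -- the lookup at M: the rightmost tail occurrence
  have hgetM : (buildLast word.toList).get? M
      = some (((z :: t).length : Int) - (List.idxOf M (z :: t).reverse : Int)) := by
    rw [hget M, hcs]
    exact lastAt_full c0 (z :: t) M hMmem
  -- every code below M's is absent
  have hmiss : ∀ k ∈ PySem.List.pyRange 0 (M.toNat : Int) 1,
      (buildLast word.toList).contains (Char.ofNat k.toNat) = false := by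
    intro k hk
    rw [PySem.List.mem_pyRange_one] at hk
    have hkN : k.toNat < M.toNat := by omega
    have hcode : (Char.ofNat k.toNat).toNat = k.toNat := toNat_ofNat_small _ (by omega)
    have hnot : Char.ofNat k.toNat ∉ word.toList.drop 1 := by
      rw [hdrop]
      intro hmem
      have := hMlb _ hmem
      rw [char_le_iff, hcode] at this
      omega
    rw [PySem.Dict.contains_eq_isSome_get?, hget, lastAt_none word.toList _ hnot _ (le_refl _)]
    rfl
  -- evaluate check_alt
  rw [check_alt]
  simp only [hcs, PySem.List.pyGet?_zero_cons]
  rw [← hcs]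
  rw [PySem.List.pyRange_one_append 0 (M.toNat : Int) 128 (by positivity) (by exact_mod_cast hM128.le),
    scanCodes_skip _ _ _ _ _ _ hmiss,
    PySem.List.pyRange_one_cons (by exact_mod_cast hM128)]
  rw [scanCodes]
  have hofM : Char.ofNat ((M.toNat : Int)).toNat = M := by
    rw [Int.toNat_natCast]
    exact Char.ofNat_toNat M
  simp only [hofM]
  rw [PySem.Dict.contains_eq_isSome_get?, hgetM]
  simp only [Option.isSome_some, if_true]
  rw [PySem.Dict.getD_eq_get?_getD, hgetM]
  rfl

-- ===== VERDICT proofs (stated by name at the bottom) =====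
theorem check_spec_aux : ∀ (word : String), Dom_check word → Pre_check word →
    ¬ D_check word → check word = check_alt word := by
  intro word hdom hpre hD
  obtain ⟨c0, rest, hcs⟩ : ∃ c0 rest, word.toList = c0 :: rest := by
    cases h : word.toList with
    | nil =>
      exfalso; apply hpre
      rw [word_eq_ofList word, h]
    | cons a l => exact ⟨a, l, rfl⟩
  cases rest with
  | nil =>
    -- single-character word: both sides return the word itself
    rw [check, check_alt]
    simp only [hcs, PySem.List.pyGet?_zero_cons, checkLoop_char]
    rw [← hcs]
    have hmiss : ∀ k ∈ PySem.List.pyRange 0 128 1,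
        (buildLast word.toList).contains (Char.ofNat k.toNat) = false := by
      intro k _
      have hnot : Char.ofNat k.toNat ∉ word.toList.drop 1 := by
        rw [hcs]; simp
      rw [PySem.Dict.contains_eq_isSome_get?, buildLast_get,
        lastAt_none word.toList _ hnot _ (le_refl _)]
      rfl
    have hscan : scanCodes (PySem.List.pyRange 0 128 1) (buildLast word.toList) word.toList c0 word
        = word := by
      rw [show PySem.List.pyRange 0 128 1 = PySem.List.pyRange 0 128 1 ++ [] from by simp,
        scanCodes_skip _ _ _ _ _ _ hmiss]
      rfl
    rw [hscan]
    simp only [List.reverse_nil, List.length_nil, Nat.cast_zero, scanRL]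
    split_ifs with hc
    · have h1 : PySem.List.slice word.toList none (some (0 : Int)) = [] := by
        simp [PySem.List.slice]
      have h2 : PySem.List.slice word.toList (some ((0 : Int) + 1)) none = [] := by
        rw [hcs]
        norm_num [PySem.List.slice_from_one]
      rw [h1, h2]
      have h3 : PySem.List.pyGetD word.toList (0 : Int) c0 = c0 := by
        rw [hcs]; rfl
      rw [h3]
      simp only [List.append_nil]
      conv_rhs => rw [word_eq_ofList word, hcs]
    · rfl
  | cons z t =>
    rw [check_alt_eval word c0 z t hcs hdom]
    rw [check]
    simp only [hcs, PySem.List.pyGet?_zero_cons, checkLoop_char]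
    obtain ⟨z', t', hrev⟩ : ∃ z' t', (z :: t).reverse = z' :: t' := by
      cases h : (z :: t).reverse with
      | nil => exact absurd h (by simp)
      | cons a l => exact ⟨a, l, rfl⟩
    set M : Char := t.foldl min z with hM
    have hMeq : t'.foldl min z' = M := min_rev_eq z t z' t' hrev
    have hMmem : M ∈ z :: t := foldl_min_mem_cons t z
    have hMlb : ∀ x ∈ z :: t, M ≤ x := fun x hx => foldl_min_lb t z x hx
    by_cases hlow : ((M.toNat : Int)) < 122
    · -- the true minimum of rest is below code 122: A finds exactly it
      have hA : scanRL (z :: t).reverse ((z :: t).length : Int) (122, ((z :: t).length : Int))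
          = ((M.toNat : Int), ((z :: t).length : Int) - (List.idxOf M (z :: t).reverse : Int)) := by
        rw [hrev, scanRL_low t' z' _ _ _ (by rw [hMeq]; exact hlow), hMeq]
      rw [hA]
      dsimp only
      by_cases hcmp : ((M.toNat : Int)) ≤ ((c0.toNat : Int))
      · rw [if_pos hcmp, if_pos ((char_le_iff M c0).mpr hcmp)]
      · rw [if_neg hcmp, if_neg (by rw [char_le_iff]; omega)]
    · -- every character of rest has code ≥ 122: A's sentinel freezes at (122, len-1)
      rw [scanRL_high _ _ _ _ (by
        intro c hc
        rw [List.mem_reverse] at hc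
        have := hMlb c hc
        rw [char_le_iff] at this
        omega)]
      dsimp only
      by_cases hc0 : ((122 : Int)) ≤ ((c0.toNat : Int))
      · -- word[0] has code ≥ 122: the not-excluded corner forces min(rest) ≤ word[0] and last = min
        have hkey : M ≤ c0 ∧ (z :: t).getLast? = some M := by
          by_contra hcon
          apply hD
          refine ⟨by rw [hcs]; simp, ?_, ?_⟩
          · intro c hc
            rw [hcs] at hc
            rcases List.mem_cons.mp hc with rfl | hc
            · rw [char_le_z_iff]; exact hc0
            · rw [char_le_z_iff]
              have := hMlb c hc
              rw [char_le_iff] at this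
              omega
          · intro m hm hlb hcon2
            rw [hcs] at hm hlb hcon2
            simp only [List.tail_cons] at hm hlb
            have hmM : m = M := le_antisymm (hlb M hMmem) (hMlb m hm)
            rw [hmM] at hcon2
            apply hcon
            simpa using hcon2
        rw [if_pos hc0, if_pos hkey.1]
        -- B's index lands on the last position, which A also uses
        have hhead : (z :: t).reverse.head? = some M := by
          rw [List.head?_reverse]; exact hkey.2
        have hidx0 : List.idxOf M (z :: t).reverse = 0 := by
          cases h : (z :: t).reverse with
          | nil => rw [h] at hhead; cases hhead
          | cons a l =>
            rw [h] at hhead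
            have ha : a = M := by simpa using hhead
            rw [ha, List.idxOf_cons_self]
        rw [hidx0]
        simp only [Nat.cast_zero, sub_zero]
      · -- word[0] is below code 122, every later character is not: both return the word unchanged
        rw [if_neg hc0, if_neg (by
          rw [char_le_iff]
          intro hle
          apply hc0
          calc (122 : Int) ≤ (M.toNat : Int) := by omega
            _ ≤ _ := hle)]

theorem cons_getElem_length (c0 z : Char) (t : List Char) :
    (c0 :: z :: t)[(z :: t).length]'(by simp) = (z :: t).getLast (List.cons_ne_nil z t) := by
  rw [List.getLast_eq_getElem]
  show (c0 :: z :: t)[t.length + 1]'(by simp) = _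
  rw [List.getElem_cons_succ]
  congr 1

theorem check_tight_aux : ∀ (word : String), Dom_check word → Pre_check word →
    D_check word → check word ≠ check_alt word := by
  intro word hdom hpre hDfull heq
  have hD' := hDfull
  unfold D_check at hD'
  obtain ⟨hlen2, hall, hA3⟩ := hD'
  obtain ⟨c0, z, t, hcs⟩ : ∃ c0 z t, word.toList = c0 :: z :: t := by
    match h : word.toList with
    | [] => rw [h] at hlen2; simp at hlen2
    | [a] => rw [h] at hlen2; simp at hlen2
    | a :: b :: l => exact ⟨a, b, l, rfl⟩
  rw [hcs] at hall
  set M : Char := t.foldl min z with hM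
  have hMmem : M ∈ z :: t := foldl_min_mem_cons t z
  have hMlb : ∀ x ∈ z :: t, M ≤ x := fun x hx => foldl_min_lb t z x hx
  have hc0 : (122 : Int) ≤ ((c0.toNat : Int)) := by
    rw [← char_le_z_iff]; exact hall c0 List.mem_cons_self
  have hallcode : ∀ c ∈ z :: t, (122 : Int) ≤ ((c.toNat : Int)) := by
    intro c hc; rw [← char_le_z_iff]; exact hall c (List.mem_cons_of_mem _ hc)
  have hA3' : ¬ (M ≤ c0 ∧ (z :: t).getLast? = some M) := by
    intro hcon
    refine hA3 M (by rw [hcs]; simpa using hMmem)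
      (by intro c hc; rw [hcs] at hc; simp only [List.tail_cons] at hc; exact hMlb c hc) ?_
    constructor
    · rw [hcs]; simpa using hcon.1
    · rw [hcs]; simpa using hcon.2
  -- evaluate both programs
  rw [check_alt_eval word c0 z t hcs hdom] at heq
  rw [check] at heq
  simp only [hcs, PySem.List.pyGet?_zero_cons, checkLoop_char] at heq
  rw [scanRL_high _ _ _ _ (by
    intro c hc
    rw [List.mem_reverse] at hc
    exact hallcode c hc)] at heq
  dsimp only at heq
  rw [if_pos hc0] at heq
  have hmemrev : M ∈ (z :: t).reverse := by rw [List.mem_reverse]; exact hMmem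
  have hj : List.idxOf M (z :: t).reverse < (z :: t).length := by
    have := List.idxOf_lt_length_of_mem hmemrev
    simpa using this
  set j : Nat := List.idxOf M (z :: t).reverse with hjdef
  -- the character A moves is the last one; the character B moves is the minimum M
  have hApick : PySem.List.pyGetD (c0 :: z :: t) (((z :: t).length : Nat) : Int) c0
      = (z :: t).getLast (List.cons_ne_nil z t) := by
    rw [PySem.List.pyGetD_eq_getElem _ _ (by positivity)
      (by simp only [List.length_cons]; push_cast; omega)]
    simp only [Int.toNat_natCast]
    exact cons_getElem_length c0 z t
  have hBpick : PySem.List.pyGetD (c0 :: z :: t) (((z :: t).length : Int) - (j : Int)) c0 = M := by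
    have hcast : ((z :: t).length : Int) - (j : Int) = (((z :: t).length - j : Nat) : Int) := by
      omega
    rw [hcast, PySem.List.pyGetD_eq_getElem _ _ (by positivity)
      (by simp only [List.length_cons]; push_cast; omega)]
    simp only [Int.toNat_natCast]
    have e2 : (z :: t).length - j = ((z :: t).length - 1 - j) + 1 := by omega
    simp only [e2, List.getElem_cons_succ]
    exact rev_getElem_idxOf (z :: t) M hmemrev
  by_cases hcm : M ≤ c0
  · rw [if_pos hcm, hApick, hBpick] at heq
    have hlist := String.ofList_inj.mp heq
    have hgl := (List.cons_eq_cons.mp hlist).1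
    exact (fun h => hA3' ⟨hcm, h⟩)
      (by rw [List.getLast?_eq_some_getLast (List.cons_ne_nil z t), hgl])
  · rw [if_neg hcm, hApick] at heq
    conv at heq => rhs; rw [word_eq_ofList word, hcs]
    have hlist := String.ofList_inj.mp heq
    have hgl := (List.cons_eq_cons.mp hlist).1
    have hle := hMlb _ (List.getLast_mem (List.cons_ne_nil z t))
    rw [hgl] at hle
    exact hcm hle

-- ===== VERDICT (by name: the statement is the Claim_ definition above) =====
theorem check_spec : Claim_unchanged_check := by
  intro word hdom hpre hD
  exact check_spec_aux word hdom hpre hD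

theorem check_tight : Claim_exact_check :=
  fun word hdom hpre hD => check_tight_aux word hdom hpre hD

set_option maxRecDepth 4000 in
theorem check_changed : Claim_changed_check := by
  unfold Claim_changed_check
  refine ⟨by decide, by decide, ?_, by decide, by decide, by decide⟩
  unfold D_check pvDiffWitness_check
  rw [show ("z{" : String).toList = ['z', '{'] from by decide]
  refine ⟨by norm_num, ?_, ?_⟩
  · intro c hc
    rcases List.mem_cons.mp hc with rfl | hc
    · decide
    · rcases List.mem_cons.mp hc with rfl | hc
      · decide
      · cases hc
  · intro m hm _ hcon
    rcases List.mem_cons.mp hm with rfl | hm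
    · exact absurd hcon.1 (by decide)
    · cases hm
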